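-- pv_equiv track=rewrite | github.com/rohith2506/Algo-world | topcoder/702/GridSort.py | number_check
-- ===== SOURCE A (Python) =====
-- def number_check(dp):
--     n, m = len(dp), len(dp[0])
--     total_numbers, all_numbers = {}, [val for val in range(1, n*m)]
--     for i in range(n):
--         for j in range(m):
--             if dp[i][j] not in total_numbers:
--                 total_numbers[dp[i][j]] = 1
--             else:
--                 total_numbers[dp[i][j]] += 1
--     for num in all_numbers:
--         num_val = total_numbers.get(num, 0)
--         if num_val == 0 or num_val > 1: return False
--     return True
-- ===== SOURCE B (Python) =====
-- def number_check(dp):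
--     n, m = len(dp), len(dp[0])
--     vals = sorted(v for row in dp for v in row[:m] if 1 <= v < n * m)
--     return vals == list(range(1, n * m))
-- ===== Notes on version B (the rewrite author's own statement) =====
-- stated objective: simpler
-- what changed: B flattens the grid (first m cells of each row), filters to the in-range values 1..n*m-1 and compares the sorted result to list(range(1, n*m)), replacing A's hand-built count dictionary and per-target lookup loop.
import Mathlib
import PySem

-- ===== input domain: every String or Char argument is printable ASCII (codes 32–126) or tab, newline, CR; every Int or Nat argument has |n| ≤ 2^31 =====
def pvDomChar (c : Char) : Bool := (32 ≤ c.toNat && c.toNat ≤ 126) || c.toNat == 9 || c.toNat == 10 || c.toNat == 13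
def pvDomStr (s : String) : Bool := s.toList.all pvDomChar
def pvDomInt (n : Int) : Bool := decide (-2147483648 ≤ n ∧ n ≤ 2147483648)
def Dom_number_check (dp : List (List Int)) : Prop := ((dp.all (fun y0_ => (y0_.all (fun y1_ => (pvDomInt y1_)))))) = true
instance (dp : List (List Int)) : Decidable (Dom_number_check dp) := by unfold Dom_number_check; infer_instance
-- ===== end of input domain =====

-- B flattens the grid (first m cells of each row), filters to the in-range values 1..n*m-1 and compares
-- the sorted result with range(1, n*m), instead of A's count dictionary plus per-target lookup loop (objective: simpler).


-- ===== PORT A =====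
def number_check (dp : List (List Int)) : Bool :=
  -- n, m = len(dp), len(dp[0])  (dp[0] raises IndexError on the empty list: none here, excluded by Pre_)
  match PySem.List.pyGet? dp 0 with
  | none => false
  | some row0 =>
    let n : Int := dp.length
    let m : Int := row0.length
    let all_numbers := PySem.List.pyRange 1 (n * m) 1
    let total_numbers : PySem.Dict Int Int :=
      (PySem.List.pyRange 0 n 1).foldl (fun d i =>
        (PySem.List.pyRange 0 m 1).foldl (fun d j =>
          let v := PySem.List.pyGetD (PySem.List.pyGetD dp i []) j 0
          if d.contains v = false then d.insert v 1
          else d.insert v (d.getD v 0 + 1)) d) PySem.Dict.empty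
    -- for num in all_numbers: early `return False` = List.all
    all_numbers.all (fun num =>
      let num_val := total_numbers.getD num 0
      !(num_val == 0 || num_val > 1))

-- ===== PORT B =====
def number_check_alt (dp : List (List Int)) : Bool :=
  match PySem.List.pyGet? dp 0 with
  | none => false
  | some row0 =>
    let n : Int := dp.length
    let m : Int := row0.length
    let vals := PySem.List.sorted
      ((dp.flatMap (fun row => PySem.List.slice row none (some m))).filter
        (fun v => decide (1 ≤ v) && decide (v < n * m)))
      (fun x => x) false
    decide (vals = PySem.List.pyRange 1 (n * m) 1)

-- ===== PRECONDITION & SPEC =====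
-- Pre_ excludes exactly the inputs on which A raises IndexError: the empty grid, and grids with a
-- row shorter than the first row (A indexes every row at columns 0..len(dp[0])-1).
def Pre_number_check (dp : List (List Int)) : Prop :=
  dp ≠ [] ∧ ∀ row ∈ dp, (dp.headD []).length ≤ row.length
instance (dp : List (List Int)) : Decidable (Pre_number_check dp) := by unfold Pre_number_check; infer_instance

def pvWitness_number_check : List (List Int) := [[1, 3], [2, 0]]

def Spec_number_check (dp : List (List Int)) (out : Bool) : Prop := out = number_check_alt dp
instance (dp : List (List Int)) (out : Bool) : Decidable (Spec_number_check dp out) := by unfold Spec_number_check; infer_instance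

-- ===== CLAIM (what is proved, stated in full; the proofs are below) =====
def Claim_equal_number_check : Prop := ∀ (dp : List (List Int)), Dom_number_check dp → Pre_number_check dp → Spec_number_check dp (number_check dp)

-- ===== LEMMAS AND PROOFS =====

-- A's dict-update step, named so the loop-shape lemmas can be applied to it
def cstep (d : PySem.Dict Int Int) (w : Int) : PySem.Dict Int Int :=
  if d.contains w = false then d.insert w 1 else d.insert w (d.getD w 0 + 1)

lemma cstep_eq : cstep = fun d w => d.insert w (d.getD w 0 + 1) := by
  funext d w
  unfold cstep
  split
  · rename_i h
    rw [PySem.Dict.getD_of_not_contains _ _ (by simpa using h)]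
    norm_num
  · rfl

-- fold over (a prefix of) each row in turn = fold over the flattened grid
lemma foldl_rows (xss : List (List Int)) (g : List Int → List Int)
    (f : PySem.Dict Int Int → Int → PySem.Dict Int Int) (d : PySem.Dict Int Int) :
    xss.foldl (fun d row => (g row).foldl f d) d = (xss.flatMap g).foldl f d := by
  induction xss generalizing d with
  | nil => rfl
  | cons r t ih => simp [List.flatMap_cons, List.foldl_append, ih]

-- the counting double loop of A computes the multiplicities of the flattened (width-m) grid
lemma fold_counts (dp : List (List Int)) (m : Nat) (hlen : ∀ row ∈ dp, m ≤ row.length) (v : Int) :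
    ((PySem.List.pyRange 0 (dp.length : Int) 1).foldl (fun d i =>
        (PySem.List.pyRange 0 (m : Int) 1).foldl (fun d j =>
          if d.contains (PySem.List.pyGetD (PySem.List.pyGetD dp i []) j 0) = false then
            d.insert (PySem.List.pyGetD (PySem.List.pyGetD dp i []) j 0) 1
          else
            d.insert (PySem.List.pyGetD (PySem.List.pyGetD dp i []) j 0)
              (d.getD (PySem.List.pyGetD (PySem.List.pyGetD dp i []) j 0) 0 + 1)) d)
      PySem.Dict.empty).getD v 0 = ((dp.flatMap (fun row => row.take m)).count v : Int) := by
  show ((PySem.List.pyRange 0 (dp.length : Int) 1).foldl (fun d i =>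
        (PySem.List.pyRange 0 (m : Int) 1).foldl (fun d j =>
          cstep d (PySem.List.pyGetD (PySem.List.pyGetD dp i []) j 0)) d)
      PySem.Dict.empty).getD v 0 = ((dp.flatMap (fun row => row.take m)).count v : Int)
  have houter :
      (PySem.List.pyRange 0 (dp.length : Int) 1).foldl (fun d i =>
        (PySem.List.pyRange 0 (m : Int) 1).foldl (fun d j =>
          cstep d (PySem.List.pyGetD (PySem.List.pyGetD dp i []) j 0)) d)
        PySem.Dict.empty
      = dp.foldl (fun d row =>
          (PySem.List.pyRange 0 (m : Int) 1).foldl (fun d j =>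
            cstep d (PySem.List.pyGetD row j 0)) d) PySem.Dict.empty :=
    PySem.List.foldl_pyRange_zero_pyGetD' dp []
      (fun d row => (PySem.List.pyRange 0 (m : Int) 1).foldl (fun d j =>
        cstep d (PySem.List.pyGetD row j 0)) d) PySem.Dict.empty
  rw [houter]
  have hcong := PySem.List.foldl_congr_mem dp
    (fun d row => (PySem.List.pyRange 0 (m : Int) 1).foldl (fun d j => cstep d (PySem.List.pyGetD row j 0)) d)
    (fun d row => (row.take m).foldl cstep d) PySem.Dict.empty
    (by intro acc row hrow
        simp only []
        have hrowc := PySem.List.foldl_congr_mem (PySem.List.pyRange 0 (m : Int) 1)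
          (fun d j => cstep d (PySem.List.pyGetD row j 0))
          (fun d j => cstep d (PySem.List.pyGetD (row.take m) j 0)) acc
          (by intro acc' j hj
              obtain ⟨hj0, hjm⟩ := PySem.List.mem_pyRange_one.mp hj
              have hjr : j < (row.length : Int) := by
                have := hlen row hrow
                omega
              simp only []
              rw [PySem.List.pyGetD_eq_getElem row 0 hj0 hjr,
                PySem.List.pyGetD_eq_getElem (row.take m) 0 hj0
                  (by rw [List.length_take]; push_cast; omega),
                List.getElem_take])
        rw [hrowc]
        have hmt : (PySem.List.pyRange 0 (m : Int) 1)
            = PySem.List.pyRange 0 ((row.take m).length : Int) 1 := by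
          rw [List.length_take]
          congr 1
          have := hlen row hrow
          omega
        rw [hmt]
        exact PySem.List.foldl_pyRange_zero_pyGetD' (row.take m) 0 cstep acc)
  rw [hcong, foldl_rows, cstep_eq, PySem.Dict.getD_foldl_insert_add_one]
  simp

-- B's sort-and-compare equals "every in-range value occurs exactly once in the flattened grid"
lemma B_char (flat : List Int) (nm : Int) :
    (PySem.List.sorted (flat.filter (fun v => decide (1 ≤ v) && decide (v < nm))) (fun x => x) false
       = PySem.List.pyRange 1 nm 1)
    ↔ (∀ v : Int, 1 ≤ v → v < nm → flat.count v = 1) := by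
  constructor
  · intro h v h1 h2
    have hperm : (flat.filter (fun v => decide (1 ≤ v) && decide (v < nm))).Perm (PySem.List.pyRange 1 nm 1) :=
      h ▸ (PySem.List.sorted_perm _ _ _).symm
    have := hperm.count_eq v
    rw [List.count_filter (by simp [h1, h2])] at this
    rw [this, List.count_eq_one_of_mem (PySem.List.nodup_pyRange_one 1 nm)
      (PySem.List.mem_pyRange_one.mpr ⟨h1, h2⟩)]
  · intro h
    apply PySem.List.sorted_eq_of_perm_of_pairwise_lt
    · apply List.perm_iff_count.mpr
      intro a
      by_cases ha : 1 ≤ a ∧ a < nm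
      · rw [List.count_eq_one_of_mem (PySem.List.nodup_pyRange_one 1 nm)
          (PySem.List.mem_pyRange_one.mpr ha),
          List.count_filter (by simp [ha.1, ha.2]), h a ha.1 ha.2]
      · rw [List.count_eq_zero_of_not_mem (by simp [PySem.List.mem_pyRange_one]; omega),
          List.count_eq_zero_of_not_mem (by
            intro hmem
            rw [List.mem_filter] at hmem
            have := hmem.2
            simp at this
            omega)]
    · exact PySem.List.pairwise_lt_pyRange_one 1 nm

lemma number_check_eq_alt : ∀ (dp : List (List Int)),
    (dp ≠ [] ∧ ∀ row ∈ dp, (dp.headD []).length ≤ row.length) →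
    number_check dp = number_check_alt dp := by
  rintro dp ⟨hne, hlen⟩
  cases dp with
  | nil => exact absurd rfl hne
  | cons r0 rest =>
    simp only [List.headD_cons] at hlen
    have hget : PySem.List.pyGet? (r0 :: rest) (0 : Int) = some r0 := by
      simp [PySem.List.pyGet?, PySem.List.pyIdx?]
    rw [number_check, number_check_alt, hget]
    simp only [PySem.List.slice_to_natCast]
    rw [Bool.eq_iff_iff, List.all_eq_true, decide_eq_true_eq, B_char]
    have hcounts := fold_counts (r0 :: rest) r0.length hlen
    simp only [hcounts]
    constructor
    · intro h v h1 h2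
      have := h v (PySem.List.mem_pyRange_one.mpr ⟨h1, h2⟩)
      simp only [Bool.not_eq_eq_eq_not, Bool.not_true, Bool.or_eq_false_iff,
        beq_eq_false_iff_ne, ne_eq, decide_eq_false_iff_not, not_lt] at this
      omega
    · intro h num hnum
      obtain ⟨h1, h2⟩ := PySem.List.mem_pyRange_one.mp hnum
      have := h num h1 h2
      simp only [this, Nat.cast_one]
      decide

-- ===== VERDICT (by name: the statement is the Claim_ definition above) =====
theorem number_check_spec : Claim_equal_number_check := by
  intro dp _ hpre
  unfold Spec_number_check
  exact number_check_eq_alt dp hpre
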